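-- pv_equiv track=rewrite | github.com/GitMonsters/octotetrahedral-agi | arc-puzzle-catalog/re-arc/solves/7ccf29ec/solver.py | transform
-- ===== SOURCE A (Python) =====
-- from collections import Counter
--
-- def transform(input_grid):
--     R = len(input_grid)
--     C = len(input_grid[0])
--     P = 2 * (R - 1)
--
--     # Find background color (most common)
--     color_count = Counter()
--     for row in input_grid:
--         for c in row:
--             color_count[c] += 1
--     bg_color = color_count.most_common(1)[0][0]
--
--     # Find seed positions (non-background cells)
--     seeds = []
--     seed_color = None
--     for r in range(R):
--         for c in range(C):
--             if input_grid[r][c] != bg_color: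
--                 seeds.append((r, c))
--                 seed_color = input_grid[r][c]
--
--     # Uniform grid: use all 4 corners as seeds
--     if not seeds:
--         seed_color = bg_color
--         seeds = [(0, 0), (0, C - 1), (R - 1, 0), (R - 1, C - 1)]
--
--     # Compute the set of diagonal residues mod P
--     S = set()
--     for (r0, c0) in seeds:
--         S.add((r0 + c0) % P)
--         S.add((c0 - r0) % P)
--
--     # Generate output
--     output = []
--     for r in range(R):
--         row = []
--         for c in range(C):
--             u = (r + c) % P
--             v = (c - r) % P
--             if u in S or v in S:
--                 row.append(seed_color)
--             else:
--                 row.append(5)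
--         output.append(row)
--
--     return output
-- ===== SOURCE B (Python) =====
-- from collections import Counter
--
-- def transform(input_grid):
--     R = len(input_grid)
--     C = len(input_grid[0])
--     P = 2 * (R - 1)
--
--     # Background color: most common over the flattened grid
--     counts = Counter(v for row in input_grid for v in row)
--     bg_color = counts.most_common(1)[0][0]
--
--     # Non-background cells with their color, in row-major order
--     nonbg = [(r, c, v)
--              for r, row in enumerate(input_grid)
--              for c, v in enumerate(row) if v != bg_color]
--     if nonbg:
--         seed_color = nonbg[-1][2]
--         seeds = [(r, c) for r, c, _ in nonbg]
--     else:
--         seed_color = bg_color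
--         seeds = [(0, 0), (0, C - 1), (R - 1, 0), (R - 1, C - 1)]
--
--     # Diagonal residues mod P of the seeds
--     S = {x % P for r, c in seeds for x in (r + c, c - r)}
--
--     # Scatter: paint both diagonal stripe families of each residue onto a 5-grid
--     output = []
--     for r in range(R):
--         row = [5] * C
--         for k in S:
--             for c in range((k - r) % P, C, P):   # r + c ≡ k (mod P)
--                 row[c] = seed_color
--             for c in range((k + r) % P, C, P):   # c - r ≡ k (mod P)
--                 row[c] = seed_color
--         output.append(row)
--     return output
-- ===== Notes on version B (the rewrite author's own statement) =====
-- stated objective: alternative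
-- what changed: The output is built by scatter instead of gather: starting from an all-5 grid, for each residue k in S both diagonal stripe families (columns stepping by P from (k-r)%P and (k+r)%P) are painted with the seed color, instead of testing (r+c)%P or (c-r)%P against S at every cell; seeds/background are collected by flat comprehensions over enumerate instead of index loops.
-- outside the precondition, e.g. on transform([[1, 2], [1, 2, 3]]): A returns [[2, 2], [2, 2]], B returns [[3, 3], [3, 3]]
import Mathlib
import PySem

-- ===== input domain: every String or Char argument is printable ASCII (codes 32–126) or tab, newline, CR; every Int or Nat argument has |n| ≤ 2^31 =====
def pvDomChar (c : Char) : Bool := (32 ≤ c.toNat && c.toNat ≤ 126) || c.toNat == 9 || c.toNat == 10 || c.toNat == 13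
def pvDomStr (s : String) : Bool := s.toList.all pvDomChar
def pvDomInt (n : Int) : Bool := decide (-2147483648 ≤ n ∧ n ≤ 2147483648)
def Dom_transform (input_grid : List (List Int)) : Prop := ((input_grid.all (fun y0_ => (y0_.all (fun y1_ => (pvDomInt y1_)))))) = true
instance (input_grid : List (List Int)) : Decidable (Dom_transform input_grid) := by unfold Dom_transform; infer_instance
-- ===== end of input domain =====

-- B rebuilds the output by SCATTER (painting both diagonal stripe families of each residue
-- onto an all-5 grid) instead of A's per-cell residue-membership test; equal on all
-- rectangular grids with at least 2 rows and 1 column.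

-- ===== PORT A =====
-- Counter.most_common(1)[0][0]: the first key attaining the maximal count (most_common's
-- stable sort breaks ties by insertion order); used by both ports (both Pythons call it).
def pvMostCommon (counter : PySem.Dict Int Int) : Int :=
  match counter.items with
  | [] => 0
  | p :: rest => (rest.foldl (fun best q => if best.2 < q.2 then q else best) p).1

def transform (input_grid : List (List Int)) : List (List Int) :=
  let R : Int := PySem.List.len input_grid
  let C : Int := PySem.List.len (PySem.List.pyGetD input_grid 0 [])
  let P : Int := 2 * (R - 1)
  let counter : PySem.Dict Int Int :=
    input_grid.foldl (fun d row => row.foldl (fun d c => PySem.Dict.modify d c 0 (fun v => v + 1)) d)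
      PySem.Dict.empty
  let bg : Int := pvMostCommon counter
  let st : List (Int × Int) × Option Int :=
    (PySem.List.pyRange 0 R 1).foldl (fun st r =>
      (PySem.List.pyRange 0 C 1).foldl (fun st c =>
        let v := PySem.List.pyGetD (PySem.List.pyGetD input_grid r []) c 0
        if v ≠ bg then (st.1 ++ [(r, c)], some v) else st) st) ([], none)
  let seeds : List (Int × Int) :=
    if st.1 = [] then [(0, 0), (0, C - 1), (R - 1, 0), (R - 1, C - 1)] else st.1
  let seedColor : Int := if st.1 = [] then bg else (st.2).getD 0
  let S : PySem.Set Int :=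
    seeds.foldl (fun s rc =>
      PySem.Set.add (PySem.Set.add s (PySem.Int.mod (rc.1 + rc.2) P)) (PySem.Int.mod (rc.2 - rc.1) P))
      PySem.Set.empty
  (PySem.List.pyRange 0 R 1).map (fun r =>
    (PySem.List.pyRange 0 C 1).map (fun c =>
      if PySem.Int.mod (r + c) P ∈ S ∨ PySem.Int.mod (c - r) P ∈ S then seedColor else 5))

-- ===== PORT B =====
def transform_alt (input_grid : List (List Int)) : List (List Int) :=
  let R : Int := PySem.List.len input_grid
  let C : Int := PySem.List.len (PySem.List.pyGetD input_grid 0 [])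
  let P : Int := 2 * (R - 1)
  let counter : PySem.Dict Int Int :=
    input_grid.flatten.foldl (fun d v => PySem.Dict.modify d v 0 (fun n => n + 1)) PySem.Dict.empty
  let bg : Int := pvMostCommon counter
  let nonbg : List (Int × Int × Int) :=
    (PySem.List.enumerate input_grid).flatMap (fun p =>
      ((PySem.List.enumerate p.2).filter (fun q => decide (q.2 ≠ bg))).map (fun q => (p.1, q.1, q.2)))
  let seedColor : Int :=
    if nonbg = [] then bg else (PySem.List.pyGetD nonbg (-1) (0, 0, 0)).2.2
  let seeds : List (Int × Int) :=
    if nonbg = [] then [(0, 0), (0, C - 1), (R - 1, 0), (R - 1, C - 1)]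
    else nonbg.map (fun t => (t.1, t.2.1))
  let S : PySem.Set Int :=
    PySem.Set.ofList (seeds.flatMap (fun rc =>
      [PySem.Int.mod (rc.1 + rc.2) P, PySem.Int.mod (rc.2 - rc.1) P]))
  (PySem.List.pyRange 0 R 1).map (fun r =>
    S.foldl (fun row k =>
      (PySem.List.pyRange (PySem.Int.mod (k + r) P) C P).foldl
        (fun row c => PySem.List.pySetD row c seedColor)
        ((PySem.List.pyRange (PySem.Int.mod (k - r) P) C P).foldl
          (fun row c => PySem.List.pySetD row c seedColor) row))
      (PySem.List.pyRepeat [5] C))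

-- ===== PRECONDITION & SPEC =====
-- Pre_ is the natural domain of rectangular grids with ≥ 2 rows and ≥ 1 column: A raises on
-- fewer rows (ZeroDivisionError / IndexError), on an empty first row (IndexError) and on rows
-- shorter than row 0 (IndexError); ragged grids whose later rows are LONGER than row 0 are
-- excluded as malformed input (A silently ignores the cells beyond column len(row0), B sees them).
def Pre_transform (input_grid : List (List Int)) : Prop :=
  2 ≤ input_grid.length ∧ 0 < input_grid.headI.length ∧
    ∀ row ∈ input_grid, row.length = input_grid.headI.length
instance (input_grid : List (List Int)) : Decidable (Pre_transform input_grid) := by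
  unfold Pre_transform; infer_instance
def pvWitness_transform : List (List Int) := [[1, 1], [1, 2]]
def Spec_transform (input_grid : List (List Int)) (out : List (List Int)) : Prop := out = transform_alt input_grid
instance (input_grid : List (List Int)) (out : List (List Int)) : Decidable (Spec_transform input_grid out) := by unfold Spec_transform; infer_instance

-- ===== CLAIM (what is proved, stated in full; the proofs are below) =====
def Claim_equal_transform : Prop := ∀ (input_grid : List (List Int)), Dom_transform input_grid → Pre_transform input_grid → Spec_transform input_grid (transform input_grid)

-- ===== LEMMAS AND PROOFS =====

lemma pv_enumerate_eq {α : Type} (d : α) (xs : List α) (s : Int) :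
    PySem.List.enumerate xs s
      = (List.range xs.length).map (fun (i : Nat) => (s + (i : Int), xs.getD i d)) := by
  induction xs generalizing s with
  | nil => rfl
  | cons x t ih =>
      show (s, x) :: PySem.List.enumerate t (s + 1) = _
      rw [ih (s + 1)]
      simp only [List.length_cons, List.range_succ_eq_map, List.map_cons, List.map_map]
      congr 1
      · simp
      · apply List.map_congr_left
        intro i _
        simp only [Function.comp_apply, List.getD_cons_succ]
        congr 1
        push_cast
        ring

lemma pv_paint_length (v : Int) (ps : List Int) (row : List Int) :
    (ps.foldl (fun row c => PySem.List.pySetD row c v) row).length = row.length := by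
  induction ps generalizing row with
  | nil => rfl
  | cons c t ih => rw [List.foldl_cons, ih, PySem.List.length_pySetD]

lemma pv_paint_getElem? (v : Int) (ps : List Int) (hps : ∀ c ∈ ps, 0 ≤ c) (row : List Int)
    (i : Nat) :
    (ps.foldl (fun row c => PySem.List.pySetD row c v) row)[i]? =
      if ((i : Int) ∈ ps) ∧ i < row.length then some v else row[i]? := by
  induction ps generalizing row with
  | nil => simp
  | cons c t ih =>
      rw [List.foldl_cons, PySem.List.pySetD_of_nonneg row v (hps c (by simp)),
        ih (fun c hc => hps c (by simp [hc]))]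
      have hc0 : 0 ≤ c := hps c (by simp)
      have hct : c.toNat = i ↔ c = (i : Int) := by omega
      rw [List.length_set, List.getElem?_set]
      by_cases h1 : (i : Int) ∈ t <;> by_cases h2 : c = (i : Int) <;>
        by_cases h3 : i < row.length <;>
        simp_all [List.mem_cons] <;> omega

lemma pv_paintAll_getElem? (v r P C : Int) (hP : 0 < P) (ks : List Int) (row : List Int)
    (i : Nat) :
    (ks.foldl (fun row k =>
        (PySem.List.pyRange (PySem.Int.mod (k + r) P) C P).foldl
          (fun row c => PySem.List.pySetD row c v)
          ((PySem.List.pyRange (PySem.Int.mod (k - r) P) C P).foldl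
            (fun row c => PySem.List.pySetD row c v) row)) row)[i]? =
      if (∃ k ∈ ks, (i : Int) ∈ PySem.List.pyRange (PySem.Int.mod (k - r) P) C P ∨
            (i : Int) ∈ PySem.List.pyRange (PySem.Int.mod (k + r) P) C P) ∧ i < row.length
        then some v else row[i]? := by
  have hnn : ∀ (a : Int), ∀ c ∈ PySem.List.pyRange (PySem.Int.mod a P) C P, 0 ≤ c := by
    intro a c hc
    have := (PySem.List.mem_pyRange_iff_of_pos hP c).1 hc
    have := PySem.Int.mod_nonneg a hP
    omega
  induction ks generalizing row with
  | nil => simp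
  | cons k t ih =>
      rw [List.foldl_cons, ih]
      rw [pv_paint_length, pv_paint_length]
      rw [pv_paint_getElem? v _ (hnn (k + r)) _ i, pv_paint_getElem? v _ (hnn (k - r)) _ i]
      rw [pv_paint_length]
      by_cases h1 : (∃ k' ∈ t, (i : Int) ∈ PySem.List.pyRange (PySem.Int.mod (k' - r) P) C P ∨
            (i : Int) ∈ PySem.List.pyRange (PySem.Int.mod (k' + r) P) C P) <;>
        by_cases h2 : (i : Int) ∈ PySem.List.pyRange (PySem.Int.mod (k + r) P) C P <;>
        by_cases h3 : (i : Int) ∈ PySem.List.pyRange (PySem.Int.mod (k - r) P) C P <;>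
        by_cases h4 : i < row.length <;>
        simp_all [List.mem_cons]

lemma pv_mem_range_iff (P r k i C : Int) (hP : 0 < P) (hk0 : 0 ≤ k) (hkP : k < P)
    (hi : 0 ≤ i) :
    i ∈ PySem.List.pyRange (PySem.Int.mod (k - r) P) C P ↔
      (i < C ∧ PySem.Int.mod (r + i) P = k) := by
  rw [PySem.List.mem_pyRange_iff_of_pos hP, PySem.Int.mod_eq_emod_of_pos hP,
    PySem.Int.mod_eq_emod_of_pos hP]
  have hkself : k % P = k := Int.emod_eq_of_lt hk0 hkP
  constructor
  · rintro ⟨hle, hlt, m, hm⟩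
    refine ⟨hlt, ?_⟩
    have hiP : i % P = (k - r) % P := by
      have : i = (k - r) % P + P * m := by omega
      rw [this, Int.add_mul_emod_self_left, Int.emod_emod_of_dvd]
      exact dvd_refl P
    rw [← hkself, Int.emod_eq_emod_iff_emod_sub_eq_zero]
    rw [Int.emod_eq_emod_iff_emod_sub_eq_zero] at hiP
    have : r + i - k = i - (k - r) := by ring
    rw [this]
    exact hiP
  · rintro ⟨hlt, hmod⟩
    have hiP : i % P = (k - r) % P := by
      rw [Int.emod_eq_emod_iff_emod_sub_eq_zero]
      rw [← hkself, Int.emod_eq_emod_iff_emod_sub_eq_zero] at hmod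
      have : i - (k - r) = r + i - k := by ring
      rw [this]
      exact hmod
    have hdef : i % P = i - P * (i / P) := by
      have := Int.emod_def i P
      omega
    have hdiv : 0 ≤ i / P := Int.ediv_nonneg hi hP.le
    have hmul : 0 ≤ P * (i / P) := mul_nonneg hP.le hdiv
    refine ⟨by omega, hlt, ⟨i / P, by omega⟩⟩

lemma pv_counter_eq (g : List (List Int)) :
    g.foldl (fun d row => row.foldl (fun d c => PySem.Dict.modify d c 0 (fun v => v + 1)) d)
        (PySem.Dict.empty : PySem.Dict Int Int)
      = g.flatten.foldl (fun d v => PySem.Dict.modify d v 0 (fun n => n + 1)) PySem.Dict.empty := by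
  rw [List.foldl_flatten]


def pvM (g : List (List Int)) : List (Int × Int × Int) :=
  (List.range g.length).flatMap (fun (i : Nat) =>
    (List.range (g.getD i []).length).map (fun (j : Nat) =>
      ((i : Int), (j : Int), (g.getD i []).getD j 0)))

lemma pv_afold_eq (g : List (List Int)) (bg : Int) (C' : Nat)
    (hrect : ∀ i ∈ List.range g.length, (g.getD i []).length = C') :
    (PySem.List.pyRange 0 (g.length : Int) 1).foldl (fun st r =>
        (PySem.List.pyRange 0 (C' : Int) 1).foldl (fun st c =>
          if PySem.List.pyGetD (PySem.List.pyGetD g r []) c 0 ≠ bg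
          then (st.1 ++ [(r, c)], some (PySem.List.pyGetD (PySem.List.pyGetD g r []) c 0)) else st)
          st) (([], none) : List (Int × Int) × Option Int)
      = (pvM g).foldl (fun st t => if t.2.2 ≠ bg then (st.1 ++ [(t.1, t.2.1)], some t.2.2) else st)
          ([], none) := by
  simp only [PySem.List.pyRange_zero_nat, List.foldl_map, PySem.List.pyGetD_natCast, pvM,
    List.foldl_flatMap]
  apply PySem.List.foldl_congr_mem
  intro acc i hi
  rw [hrect i hi]

lemma pv_nonbg_eq (g : List (List Int)) (bg : Int) :
    (PySem.List.enumerate g).flatMap (fun p =>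
        ((PySem.List.enumerate p.2).filter (fun q => decide (q.2 ≠ bg))).map (fun q => (p.1, q.1, q.2)))
      = (pvM g).filter (fun t => decide (t.2.2 ≠ bg)) := by
  simp only [pv_enumerate_eq ([] : List Int), pv_enumerate_eq (0 : Int), pvM,
    List.filter_flatMap, List.flatMap_map, List.filter_map, List.map_map, Function.comp_def,
    zero_add]

lemma pv_cellsFold_char' (bg : Int) :
    ∀ (l : List (Int × Int × Int)) (acc : List (Int × Int)) (sc : Option Int),
    l.foldl (fun st t => if t.2.2 ≠ bg then (st.1 ++ [(t.1, t.2.1)], some t.2.2) else st) (acc, sc)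
      = (acc ++ (l.filter (fun t => decide (t.2.2 ≠ bg))).map (fun t => (t.1, t.2.1)),
         ((l.filter (fun t => decide (t.2.2 ≠ bg))).getLast?).elim sc (fun t => some t.2.2)) := by
  intro l
  induction l with
  | nil => simp
  | cons t ts ih =>
      intro acc sc
      rw [List.foldl_cons]
      by_cases h : t.2.2 = bg
      · rw [if_neg (by simp [h]), List.filter_cons_of_neg (by simp [h]), ih]
      · rw [if_pos h, List.filter_cons_of_pos (by simp [h]), ih]
        cases hfil : ts.filter (fun t => decide (t.2.2 ≠ bg)) with
        | nil => simp [hfil]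
        | cons u us =>
            cases hlast : (u :: us).getLast? with
            | none => simp at hlast
            | some w => simp [hfil, hlast]

lemma pv_cellsFold_char (g : List (List Int)) (bg : Int) :
    (pvM g).foldl (fun st t => if t.2.2 ≠ bg then (st.1 ++ [(t.1, t.2.1)], some t.2.2) else st)
        ([], none)
      = (((pvM g).filter (fun t => decide (t.2.2 ≠ bg))).map (fun t => (t.1, t.2.1)),
         (((pvM g).filter (fun t => decide (t.2.2 ≠ bg))).getLast?).elim none
           (fun t => some t.2.2)) := by
  rw [pv_cellsFold_char' bg (pvM g) [] none]
  simp

lemma pv_S_eq (seeds : List (Int × Int)) (P : Int) :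
    seeds.foldl (fun s rc =>
        PySem.Set.add (PySem.Set.add s (PySem.Int.mod (rc.1 + rc.2) P))
          (PySem.Int.mod (rc.2 - rc.1) P)) PySem.Set.empty
      = PySem.Set.ofList (seeds.flatMap (fun rc =>
          [PySem.Int.mod (rc.1 + rc.2) P, PySem.Int.mod (rc.2 - rc.1) P])) := by
  rw [PySem.Set.ofList_eq_foldl, List.foldl_flatMap]
  rfl

lemma pv_S_bounds (seeds : List (Int × Int)) (P : Int) (hP : 0 < P) :
    ∀ k ∈ PySem.Set.ofList (seeds.flatMap (fun rc =>
        [PySem.Int.mod (rc.1 + rc.2) P, PySem.Int.mod (rc.2 - rc.1) P])), 0 ≤ k ∧ k < P := by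
  intro k hk
  rw [PySem.Set.mem_ofList, List.mem_flatMap] at hk
  obtain ⟨rc, -, hk⟩ := hk
  simp only [List.mem_cons, List.not_mem_nil, or_false] at hk
  rcases hk with h | h <;> subst h <;>
    exact ⟨PySem.Int.mod_nonneg _ hP, PySem.Int.mod_lt _ hP⟩

lemma pv_row_eq (S : List Int) (v P : Int) (C' : Nat) (rn : Nat) (hP : 0 < P)
    (hS : ∀ k ∈ S, 0 ≤ k ∧ k < P) :
    (List.range C').map (fun (cn : Nat) =>
        if PySem.Int.mod ((rn : Int) + (cn : Int)) P ∈ S ∨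
            PySem.Int.mod ((cn : Int) - (rn : Int)) P ∈ S
        then v else (5 : Int))
      = S.foldl (fun row k =>
          (PySem.List.pyRange (PySem.Int.mod (k + (rn : Int)) P) ((C' : Nat) : Int) P).foldl
            (fun row c => PySem.List.pySetD row c v)
            ((PySem.List.pyRange (PySem.Int.mod (k - (rn : Int)) P) ((C' : Nat) : Int) P).foldl
              (fun row c => PySem.List.pySetD row c v) row)) (List.replicate C' (5 : Int)) := by
  have hfam1 : ∀ (i : Nat), ∀ k, 0 ≤ k → k < P →
      ((i : Int) ∈ PySem.List.pyRange (PySem.Int.mod (k - (rn : Int)) P) ((C' : Nat) : Int) P ↔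
        ((i : Int) < (C' : Int) ∧ PySem.Int.mod ((rn : Int) + (i : Int)) P = k)) := by
    intro i k hk0 hkP
    exact pv_mem_range_iff P (rn : Int) k (i : Int) (C' : Int) hP hk0 hkP (Int.natCast_nonneg i)
  have hfam2 : ∀ (i : Nat), ∀ k, 0 ≤ k → k < P →
      ((i : Int) ∈ PySem.List.pyRange (PySem.Int.mod (k + (rn : Int)) P) ((C' : Nat) : Int) P ↔
        ((i : Int) < (C' : Int) ∧ PySem.Int.mod ((i : Int) - (rn : Int)) P = k)) := by
    intro i k hk0 hkP
    have h := pv_mem_range_iff P (-(rn : Int)) k (i : Int) (C' : Int) hP hk0 hkP (Int.natCast_nonneg i)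
    rw [sub_neg_eq_add, neg_add_eq_sub] at h
    exact h
  apply List.ext_getElem?
  intro i
  rw [pv_paintAll_getElem? v (rn : Int) P ((C' : Nat) : Int) hP S _ i]
  rw [List.length_replicate, List.getElem?_map, List.getElem?_replicate]
  by_cases hi : i < C'
  · have hiC : (i : Int) < (C' : Int) := by exact_mod_cast hi
    have hbig : (∃ k ∈ S,
        (i : Int) ∈ PySem.List.pyRange (PySem.Int.mod (k - (rn : Int)) P) ((C' : Nat) : Int) P ∨
        (i : Int) ∈ PySem.List.pyRange (PySem.Int.mod (k + (rn : Int)) P) ((C' : Nat) : Int) P) ↔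
        (PySem.Int.mod ((rn : Int) + (i : Int)) P ∈ S ∨
         PySem.Int.mod ((i : Int) - (rn : Int)) P ∈ S) := by
      constructor
      · rintro ⟨k, hkS, hm | hm⟩
        · left
          rw [hfam1 i k (hS k hkS).1 (hS k hkS).2] at hm
          rw [hm.2]
          exact hkS
        · right
          rw [hfam2 i k (hS k hkS).1 (hS k hkS).2] at hm
          rw [hm.2]
          exact hkS
      · rintro (hm | hm)
        · refine ⟨_, hm, Or.inl ?_⟩
          rw [hfam1 i _ (PySem.Int.mod_nonneg _ hP) (PySem.Int.mod_lt _ hP)]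
          exact ⟨hiC, rfl⟩
        · refine ⟨_, hm, Or.inr ?_⟩
          rw [hfam2 i _ (PySem.Int.mod_nonneg _ hP) (PySem.Int.mod_lt _ hP)]
          exact ⟨hiC, rfl⟩
    by_cases hc : (PySem.Int.mod ((rn : Int) + (i : Int)) P ∈ S ∨
        PySem.Int.mod ((i : Int) - (rn : Int)) P ∈ S)
    · have h1 := hbig.mpr hc
      simp [hi, hc, h1]
    · have h1 : ¬ _ := fun h => hc (hbig.mp h)
      simp [hi, hc, h1]
  · have hnone : (List.range C')[i]? = none := by
      rw [List.getElem?_eq_none] <;> simpa using hi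
    rw [hnone]
    simp [hi]

lemma pv_output_eq (S : List Int) (v : Int) (R' C' : Nat) (P : Int) (hP : 0 < P)
    (hS : ∀ k ∈ S, 0 ≤ k ∧ k < P) :
    (PySem.List.pyRange 0 (R' : Int) 1).map (fun r =>
        (PySem.List.pyRange 0 (C' : Int) 1).map (fun c =>
          if PySem.Int.mod (r + c) P ∈ S ∨ PySem.Int.mod (c - r) P ∈ S then v else 5))
      = (PySem.List.pyRange 0 (R' : Int) 1).map (fun r =>
          S.foldl (fun row k =>
            (PySem.List.pyRange (PySem.Int.mod (k + r) P) (C' : Int) P).foldl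
              (fun row c => PySem.List.pySetD row c v)
              ((PySem.List.pyRange (PySem.Int.mod (k - r) P) (C' : Int) P).foldl
                (fun row c => PySem.List.pySetD row c v) row)) (PySem.List.pyRepeat [5] (C' : Int))) := by
  apply List.map_congr_left
  intro r hr
  rw [PySem.List.mem_pyRange_one] at hr
  obtain ⟨hr0, -⟩ := hr
  obtain ⟨rn, rfl⟩ : ∃ rn : Nat, r = (rn : Int) := ⟨r.toNat, (Int.toNat_of_nonneg hr0).symm⟩
  rw [PySem.List.pyRepeat_singleton, Int.toNat_natCast]
  rw [PySem.List.pyRange_zero_nat, List.map_map]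
  have h := pv_row_eq S v P C' rn hP hS
  simpa [Function.comp] using h

-- ===== VERDICT (by name: the statement is the Claim_ definition above) =====
theorem transform_spec : Claim_equal_transform := by
  intro g _hdom hpre
  obtain ⟨hR2, hC0, hrect0⟩ := hpre
  unfold Spec_transform
  have hgne : g ≠ [] := by intro h; subst h; simp at hR2
  have hhead : g.getD 0 [] = g.headI := by
    cases g with
    | nil => cases hgne rfl
    | cons a t => rfl
  have hrect : ∀ i ∈ List.range g.length, (g.getD i []).length = (g.getD 0 []).length := by
    intro i hi
    have hi' : i < g.length := List.mem_range.mp hi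
    rw [hhead, List.getD_eq_getElem g [] hi']
    exact hrect0 _ (List.getElem_mem hi')
  have hP : (0 : Int) < 2 * ((g.length : Int) - 1) := by omega
  unfold transform transform_alt
  simp only [PySem.List.len_eq, PySem.List.pyGetD_zero]
  rw [pv_counter_eq g]
  generalize g.flatten.foldl (fun d v => PySem.Dict.modify d v 0 (fun n => n + 1))
      (PySem.Dict.empty : PySem.Dict Int Int) = D
  generalize pvMostCommon D = bgv
  rw [pv_afold_eq g bgv (g.getD 0 []).length hrect, pv_cellsFold_char g bgv, pv_nonbg_eq g bgv]
  dsimp only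
  by_cases hNN : (pvM g).filter (fun t => decide (t.2.2 ≠ bgv)) = []
  · rw [hNN]
    simp only [List.map_nil]
    rw [pv_S_eq]
    exact pv_output_eq _ _ _ _ _ hP (pv_S_bounds _ _ hP)
  · have hmapne : ¬ ((pvM g).filter (fun t => decide (t.2.2 ≠ bgv))).map
        (fun t => (t.1, t.2.1)) = [] := by
      simpa [List.map_eq_nil_iff] using hNN
    rw [if_neg hmapne, if_neg hmapne, if_neg hNN, if_neg hNN]
    rw [List.getLast?_eq_some_getLast hNN, PySem.List.pyGetD_neg_one _ _ hNN]
    dsimp only [Option.elim, Option.getD]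
    rw [pv_S_eq]
    exact pv_output_eq _ _ _ _ _ hP (pv_S_bounds _ _ hP)
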